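-- pv_equiv track=rewrite | github.com/all-of-us/raw-data-repository | rdr_service/client/client_libs/check_ppi_data.py | convert_csv_column_to_dict
-- ===== SOURCE A (Python) =====
-- def convert_csv_column_to_dict(csv_data, column):
--     """
--     Return a dictionary object with keys from the first column and values from the specified
--     column.
--     :param csv_data: File-like CSV text downloaded from Google spreadsheets. (See main doc.)
--     :return: dict of fields and values for given column
--     """
--     results = dict()
--
--     for row in csv_data:
--         key = row[0]
--         data = row[1:][column]
--
--         if key not in results:
--             results[key] = data.strip() if data else ""
--         else:
--             if data:
--                 # append multiple choice questions
--                 results[key] += "|{0}".format(data.strip())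
--
--     return results
-- ===== SOURCE B (Python) =====
-- def convert_csv_column_to_dict(csv_data, column):
--     """Two-pass version: group values per key, then reduce each group to the
--     final pipe-joined string."""
--     groups = {}
--     for row in csv_data:
--         groups.setdefault(row[0], []).append(row[1:][column])
--     results = {}
--     for key, values in groups.items():
--         text = values[0].strip() if values[0] else ""
--         for v in values[1:]:
--             if v:
--                 text += "|" + v.strip()
--         results[key] = text
--     return results
-- ===== Notes on version B (the rewrite author's own statement) =====
-- stated objective: alternative
-- what changed: Replaces A's single interleaved loop (first-vs-existing branch per row) with a grouping pass that collects each key's column values into a list and a second pass that folds each list into the pipe-joined string.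
import Mathlib
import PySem

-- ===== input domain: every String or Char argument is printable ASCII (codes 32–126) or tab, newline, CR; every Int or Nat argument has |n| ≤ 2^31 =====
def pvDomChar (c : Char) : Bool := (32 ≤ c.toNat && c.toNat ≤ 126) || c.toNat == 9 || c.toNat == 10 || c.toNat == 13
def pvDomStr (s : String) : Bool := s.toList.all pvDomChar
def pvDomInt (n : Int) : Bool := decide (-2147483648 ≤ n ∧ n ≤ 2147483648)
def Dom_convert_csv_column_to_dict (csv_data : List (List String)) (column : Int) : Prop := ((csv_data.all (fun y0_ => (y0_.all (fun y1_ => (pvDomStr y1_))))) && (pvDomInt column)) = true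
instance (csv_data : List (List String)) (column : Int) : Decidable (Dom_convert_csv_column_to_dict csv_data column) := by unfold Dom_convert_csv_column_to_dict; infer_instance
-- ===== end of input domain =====

-- B re-implements A as two passes (group values per key, then reduce each group); equivalence is about the return value.

-- shared row accessors: key = row[0], data = row[1:][column]
def pvKey (row : List String) : String := PySem.List.pyGetD row 0 ""
def pvData (row : List String) (column : Int) : String :=
  PySem.List.pyGetD (PySem.List.slice row (some 1) none) column ""

-- ===== PORT A =====
-- loop body of A: first occurrence sets stripped value (or ""), later truthy data appends "|"+strip
def pvStepA (column : Int) (results : PySem.Dict String String) (row : List String) : PySem.Dict String String :=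
  let key := pvKey row
  let data := pvData row column
  if !(results.contains key) then
    results.insert key (if data ≠ "" then PySem.Str.strip data else "")
  else
    if data ≠ "" then results.insert key (results.getD key "" ++ "|" ++ PySem.Str.strip data)
    else results

def convert_csv_column_to_dict (csv_data : List (List String)) (column : Int) : List (String × String) :=
  (csv_data.foldl (pvStepA column) PySem.Dict.empty).items

-- ===== PORT B =====
-- reduce one group's value list to the final string (groups are never empty; [] case unreachable)
def pvReduce (vals : List String) : String :=
  match vals with
  | [] => ""
  | v :: rest =>
    rest.foldl (fun acc d => if d ≠ "" then acc ++ "|" ++ PySem.Str.strip d else acc)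
      (if v ≠ "" then PySem.Str.strip v else "")

-- grouping pass: groups.setdefault(row[0], []).append(data)
def pvStepB (column : Int) (g : PySem.Dict String (List String)) (row : List String) : PySem.Dict String (List String) :=
  g.modify (pvKey row) [] (· ++ [pvData row column])

def convert_csv_column_to_dict_alt (csv_data : List (List String)) (column : Int) : List (String × String) :=
  let groups := csv_data.foldl (pvStepB column) PySem.Dict.empty
  (groups.items.foldl (fun r p => r.insert p.1 (pvReduce p.2)) PySem.Dict.empty).items

-- ===== PRECONDITION & SPEC =====
-- Pre_ excludes exactly the inputs where A raises IndexError: an empty row (row[0]) or a row whose tail has no index `column`.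
def Pre_convert_csv_column_to_dict (csv_data : List (List String)) (column : Int) : Prop :=
  ∀ row ∈ csv_data, row ≠ [] ∧ PySem.Raise.InRange (row.drop 1).length column
instance (csv_data : List (List String)) (column : Int) : Decidable (Pre_convert_csv_column_to_dict csv_data column) := by unfold Pre_convert_csv_column_to_dict; infer_instance

def pvWitness_convert_csv_column_to_dict : List (List String) × Int := ([["a", "x", "y"], ["a", "z", ""]], 0)

def Spec_convert_csv_column_to_dict (csv_data : List (List String)) (column : Int) (out : List (String × String)) : Prop := out = convert_csv_column_to_dict_alt csv_data column
instance (csv_data : List (List String)) (column : Int) (out : List (String × String)) : Decidable (Spec_convert_csv_column_to_dict csv_data column out) := by unfold Spec_convert_csv_column_to_dict; infer_instance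

-- ===== CLAIM (what is proved, stated in full; the proofs are below) =====
def Claim_equal_convert_csv_column_to_dict : Prop := ∀ (csv_data : List (List String)) (column : Int), Dom_convert_csv_column_to_dict csv_data column → Pre_convert_csv_column_to_dict csv_data column → Spec_convert_csv_column_to_dict csv_data column (convert_csv_column_to_dict csv_data column)

-- ===== LEMMAS AND PROOFS =====

lemma pvReduce_append (l : List String) (hl : l ≠ []) (d : String) :
    pvReduce (l ++ [d]) = if d ≠ "" then pvReduce l ++ "|" ++ PySem.Str.strip d else pvReduce l := by
  cases l with
  | nil => exact absurd rfl hl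
  | cons v rest => simp [pvReduce, List.foldl_append]

-- loop invariant relating A's dict to B's group dict, preserved by one row
lemma pv_step_pres (column : Int) (row : List String)
    (dA : PySem.Dict String String) (g : PySem.Dict String (List String))
    (h1 : dA.keys = g.keys)
    (h2 : ∀ k, k ∈ g.keys → g.getD k [] ≠ [])
    (h3 : ∀ k, dA.getD k "" = pvReduce (g.getD k [])) :
    (pvStepA column dA row).keys = (pvStepB column g row).keys ∧
    (∀ k, k ∈ (pvStepB column g row).keys → (pvStepB column g row).getD k [] ≠ []) ∧
    (∀ k, (pvStepA column dA row).getD k "" = pvReduce ((pvStepB column g row).getD k [])) := by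
  classical
  set key := pvKey row with hkey
  set data := pvData row column with hdata
  have hgc : g.contains key = dA.contains key := by
    rw [PySem.Dict.contains_eq_decide_mem_keys, PySem.Dict.contains_eq_decide_mem_keys, h1]
  have hgetB_self : (pvStepB column g row).getD key [] = g.getD key [] ++ [data] :=
    PySem.Dict.getD_modify_self g key [] (· ++ [data])
  have hgetB_ne : ∀ k, k ≠ key → (pvStepB column g row).getD k [] = g.getD k [] :=
    fun k h => PySem.Dict.getD_modify_of_ne g [] (· ++ [data]) h
  by_cases hc : dA.contains key = true
  · -- key already present in A's dict
    have hgk : g.contains key = true := hgc.trans hc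
    have hmem : key ∈ g.keys := by
      have := PySem.Dict.contains_eq_decide_mem_keys g key
      rw [hgk] at this
      exact of_decide_eq_true this.symm
    have hkeysB : (pvStepB column g row).keys = g.keys := by
      rw [pvStepB, PySem.Dict.keys_modify, PySem.Dict.keys_insert_of_contains _ _ hgk]
    have hAform : pvStepA column dA row =
        if data ≠ "" then dA.insert key (dA.getD key "" ++ "|" ++ PySem.Str.strip data) else dA := by
      simp [pvStepA, hc, ← hkey, ← hdata]
    refine ⟨?_, ?_, ?_⟩
    · rw [hkeysB, hAform]
      split_ifs with h
      · rw [PySem.Dict.keys_insert_of_contains _ _ hc]; exact h1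
      · exact h1
    · intro k hkmem
      rw [hkeysB] at hkmem
      by_cases hkk : k = key
      · subst hkk; rw [hgetB_self]; simp
      · rw [hgetB_ne k hkk]; exact h2 k hkmem
    · intro k
      rw [hAform]
      by_cases hkk : k = key
      · subst hkk
        rw [hgetB_self, pvReduce_append _ (h2 key hmem) data]
        by_cases h : data = ""
        · simp [h, h3 key]
        · simp [h, h3 key]
      · rw [hgetB_ne k hkk]
        split_ifs with h
        · rw [PySem.Dict.getD_insert]; simp [hkk, h3 k]
        · exact h3 k
  · -- first occurrence of the key
    have hc' : dA.contains key = false := by simpa using hc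
    have hgk : g.contains key = false := hgc.trans hc'
    have hgempty : g.getD key [] = [] := PySem.Dict.getD_of_not_contains g [] hgk
    have hkeysB : (pvStepB column g row).keys = g.keys ++ [key] := by
      rw [pvStepB, PySem.Dict.keys_modify, PySem.Dict.keys_insert_of_not_contains _ _ hgk]
    have hAform : pvStepA column dA row =
        dA.insert key (if data ≠ "" then PySem.Str.strip data else "") := by
      simp [pvStepA, hc', ← hkey, ← hdata]
    refine ⟨?_, ?_, ?_⟩
    · rw [hAform, PySem.Dict.keys_insert_of_not_contains _ _ hc', hkeysB, h1]
    · intro k hkmem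
      by_cases hkk : k = key
      · subst hkk; rw [hgetB_self, hgempty]; simp
      · rw [hgetB_ne k hkk]
        rw [hkeysB] at hkmem
        rcases List.mem_append.mp hkmem with h | h
        · exact h2 k h
        · exact absurd (List.mem_singleton.mp h) hkk
    · intro k
      rw [hAform]
      by_cases hkk : k = key
      · subst hkk
        rw [hgetB_self, hgempty, PySem.Dict.getD_insert]
        simp [pvReduce]
      · rw [hgetB_ne k hkk, PySem.Dict.getD_insert]
        simp [hkk, h3 k]

lemma pv_fold_inv (column : Int) (rows : List (List String))
    (dA : PySem.Dict String String) (g : PySem.Dict String (List String))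
    (h1 : dA.keys = g.keys)
    (h2 : ∀ k, k ∈ g.keys → g.getD k [] ≠ [])
    (h3 : ∀ k, dA.getD k "" = pvReduce (g.getD k [])) :
    (rows.foldl (pvStepA column) dA).keys = (rows.foldl (pvStepB column) g).keys ∧
    (∀ k, k ∈ (rows.foldl (pvStepB column) g).keys → (rows.foldl (pvStepB column) g).getD k [] ≠ []) ∧
    (∀ k, (rows.foldl (pvStepA column) dA).getD k "" = pvReduce ((rows.foldl (pvStepB column) g).getD k [])) := by
  induction rows generalizing dA g with
  | nil => exact ⟨h1, h2, h3⟩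
  | cons row rows ih =>
    obtain ⟨s1, s2, s3⟩ := pv_step_pres column row dA g h1 h2 h3
    simpa [List.foldl_cons] using ih _ _ s1 s2 s3

-- ===== VERDICT (by name: the statement is the Claim_ definition above) =====
theorem convert_csv_column_to_dict_spec : Claim_equal_convert_csv_column_to_dict := by
  intro csv_data column _ _
  unfold Spec_convert_csv_column_to_dict convert_csv_column_to_dict convert_csv_column_to_dict_alt
  obtain ⟨e1, e2, e3⟩ := pv_fold_inv column csv_data PySem.Dict.empty PySem.Dict.empty
    (by rw [PySem.Dict.keys_empty, PySem.Dict.keys_empty])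
    (by intro k hk; rw [PySem.Dict.keys_empty] at hk; cases hk)
    (by intro k; rw [PySem.Dict.getD_empty, PySem.Dict.getD_empty]; rfl)
  set gf := csv_data.foldl (pvStepB column) PySem.Dict.empty with hgf
  set dAf := csv_data.foldl (pvStepA column) PySem.Dict.empty with hdAf
  have hnodB : gf.keys.Nodup := by
    exact PySem.Dict.nodup_keys_foldl_modify_key csv_data pvKey []
      (fun _ x => (· ++ [pvData x column])) PySem.Dict.empty
      (by rw [PySem.Dict.keys_empty]; exact List.nodup_nil)
  have hnodA : dAf.keys.Nodup := by rw [e1]; exact hnodB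
  have hfresh : ∀ p ∈ gf.items, (PySem.Dict.empty : PySem.Dict String String).contains p.1 = false :=
    fun p _ => PySem.Dict.contains_empty p.1
  have hmapnod : (gf.items.map (fun p => p.1)).Nodup := hnodB
  rw [PySem.Dict.items_foldl_insert_fresh gf.items (fun p => p.1) (fun p => pvReduce p.2)
        PySem.Dict.empty hfresh hmapnod]
  rw [PySem.Dict.items_eq_map_keys dAf hnodA "", PySem.Dict.items_eq_map_keys gf hnodB []]
  simp only [List.map_map]
  rw [e1]
  exact List.map_congr_left fun k _ => by simp [e3 k]
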